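-- pv_equiv track=rewrite | github.com/alexrinc/Projet-Maths-Info-Travelling-Salesman-Problem | insertion.py | insertion_heuristique
-- ===== SOURCE A (Python) =====
-- def calcul_du_cout(chemin, matrice):
--     """
--     Calcule la longueur totale d'un chemin fermé donc retour à la ville de départ
--     à partir d'un chemin donné et d'une matrice de distance
--
--     """
--     return sum(matrice[chemin[i]][chemin[(i + 1) % len(chemin)]] for i in range(len(chemin)))
--
-- def insertion_heuristique(matrice_villes):
--     """
--     METHODE D'INSERTION :
--     Construit une solution approchée du TSP par heuristique d'insertion
--
--     La fonction prend en entrée une matrice carrée des distances entre les villes et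
--     renvoie un ordre de visite minimisant approximativment la distance totale du chemin
--
--     """
--     n = len(matrice_villes)                                 #Nombre total des villes
--     non_visitees = list(range(n))                           #Liste des idices des villes non inserees dans le circuit
--     chemin = [non_visitees.pop(0), non_visitees.pop(0)]     #Initialisation du chemin avec les deux premières villes
--
--
--     while non_visitees:
--         #Recherhce la meilleure ville à inserer et de sa position optimale
--
--         meilleur_cout = float('inf')                            #Init avec la valeur infini pour technique borne inférieur
--         meilleure_position = None
--         ville_ainserer = None
--
--         for v in non_visitees:                                  #Insertion de chaque ville restantes une à une
--             for i in range(len(chemin)):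
--                 test_chemin = chemin[:i+1] + [v] + chemin[i+1:] #Création d'un nouveau chemin hypothétique ave la ville v
--                 nouveau_cout = calcul_du_cout(test_chemin, matrice_villes)
--
--                 #Si l'insertion donne un meilleur cout alors on la garde en mémoire comme meilleure option
--                 if nouveau_cout < meilleur_cout:
--                     meilleur_cout = nouveau_cout
--                     meilleure_position = i+1
--                     ville_ainserer = v
--
--         #Insertion de la meilleure ville à la meilleure position
--         chemin.insert(meilleure_position, ville_ainserer)
--         non_visitees.remove(ville_ainserer)
--
--     return chemin
-- ===== SOURCE B (Python) =====
-- def insertion_heuristique(matrice_villes):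
--     """Insertion heuristic for the TSP, selecting each insertion by its O(1)
--     cost delta d[a][v] + d[v][b] - d[a][b] instead of re-summing the whole tour."""
--     n = len(matrice_villes)
--     restantes = list(range(n))
--     chemin = [restantes.pop(0), restantes.pop(0)]
--     while restantes:
--         best = None  # (delta, position, ville)
--         for v in restantes:
--             for i in range(len(chemin)):
--                 a = chemin[i]
--                 b = chemin[(i + 1) % len(chemin)]
--                 delta = matrice_villes[a][v] + matrice_villes[v][b] - matrice_villes[a][b]
--                 if best is None or delta < best[0]:
--                     best = (delta, i + 1, v)
--         _, pos, v = best
--         chemin.insert(pos, v)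
--         restantes.remove(v)
--     return chemin
-- ===== Notes on version B (the rewrite author's own statement) =====
-- stated objective: faster
-- what changed: Each candidate insertion is scored by its O(1) cost delta d[a][v]+d[v][b]-d[a][b] instead of building the hypothetical tour and re-summing its whole length, removing one O(n) pass from the innermost loop (O(n^4) -> O(n^3)); since the delta differs from A's full cost by the constant current-tour length, the strict-improvement argmin (first minimum) is identical.
import Mathlib
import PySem

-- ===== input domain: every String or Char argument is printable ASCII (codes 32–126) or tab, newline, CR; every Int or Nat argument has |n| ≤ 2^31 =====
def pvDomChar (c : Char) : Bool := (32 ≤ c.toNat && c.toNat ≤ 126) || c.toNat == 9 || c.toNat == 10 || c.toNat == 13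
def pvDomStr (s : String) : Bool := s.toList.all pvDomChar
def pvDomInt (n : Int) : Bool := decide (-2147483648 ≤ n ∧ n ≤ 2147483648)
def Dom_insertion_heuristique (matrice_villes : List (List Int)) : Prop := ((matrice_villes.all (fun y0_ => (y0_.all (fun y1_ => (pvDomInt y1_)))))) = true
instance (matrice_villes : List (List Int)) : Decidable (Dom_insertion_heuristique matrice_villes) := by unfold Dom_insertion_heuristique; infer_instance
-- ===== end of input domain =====

-- B scores each candidate insertion by its O(1) cost delta instead of re-summing the whole
-- hypothetical tour (objective: faster; the strict-first-minimum selection is unchanged).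


-- ===== PORT A =====
-- matrice[x][y] (total form; Pre_ keeps every access in range)
def pvAt2 (m : List (List Int)) (x y : Int) : Int :=
  ((PySem.List.pyGet? m x).bind (fun r => PySem.List.pyGet? r y)).getD 0

-- chemin[i] for a nonnegative in-range index i
def pvGetI (l : List Int) (i : Nat) : Int :=
  (PySem.List.pyGet? l (i : Int)).getD 0

-- calcul_du_cout: sum over i in range(len(chemin)) of matrice[chemin[i]][chemin[(i+1)%len]]
def pvCoutA (m : List (List Int)) (chemin : List Int) : Int :=
  (List.range chemin.length).foldl
    (fun acc i => acc + pvAt2 m (pvGetI chemin i) (pvGetI chemin ((i + 1) % chemin.length))) 0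

-- body of A's inner loop: state (meilleur_cout, meilleure_position, ville_ainserer),
-- float('inf')/None modelled as none
def pvStepA (m : List (List Int)) (chemin : List Int) (v : Int)
    (st : Option Int × Option Int × Option Int) (i : Nat) :
    Option Int × Option Int × Option Int :=
  let test := PySem.List.slice chemin none (some ((i : Int) + 1)) ++ [v] ++
              PySem.List.slice chemin (some ((i : Int) + 1)) none
  let nc := pvCoutA m test
  match st.1 with
  | none => (some nc, some ((i : Int) + 1), some v)
  | some c => if nc < c then (some nc, some ((i : Int) + 1), some v) else st

-- one pass of A's candidate search (the two nested for loops)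
def pvEtapeA (m : List (List Int)) (chemin nv : List Int) :
    Option Int × Option Int × Option Int :=
  nv.foldl (fun st v => (List.range chemin.length).foldl (pvStepA m chemin v) st)
    (none, none, none)

-- the while loop; fuel = number of cities still to insert (one is inserted per iteration)
def pvBoucleA (m : List (List Int)) : Nat → List Int → List Int → List Int
  | 0, chemin, _ => chemin
  | fuel + 1, chemin, nv =>
    if nv = [] then chemin
    else
      match pvEtapeA m chemin nv with
      | (_, some pos, some v) =>
          pvBoucleA m fuel (PySem.List.insert chemin pos v) ((PySem.List.remove? nv v).getD nv)
      | _ => chemin  -- unreachable when chemin ≠ [] and nv ≠ []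

def insertion_heuristique (matrice_villes : List (List Int)) : List Int :=
  match PySem.List.pyRange 0 matrice_villes.length 1 with
  | v0 :: v1 :: rest => pvBoucleA matrice_villes rest.length [v0, v1] rest
  | _ => []  -- n < 2: Python's pop(0) raises IndexError (excluded by Pre_)

-- ===== PORT B =====
-- O(1) insertion cost delta of putting v between chemin[i] and chemin[(i+1)%len]
def pvDelta (m : List (List Int)) (chemin : List Int) (i : Nat) (v : Int) : Int :=
  let a := pvGetI chemin i
  let b := pvGetI chemin ((i + 1) % chemin.length)
  pvAt2 m a v + pvAt2 m v b - pvAt2 m a b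

-- body of B's inner loop: best = None | (delta, position, ville)
def pvStepB (m : List (List Int)) (chemin : List Int) (v : Int)
    (best : Option (Int × Int × Int)) (i : Nat) : Option (Int × Int × Int) :=
  let delta := pvDelta m chemin i v
  match best with
  | none => some (delta, (i : Int) + 1, v)
  | some t => if delta < t.1 then some (delta, (i : Int) + 1, v) else best

-- one pass of B's candidate search
def pvEtapeB (m : List (List Int)) (chemin rem : List Int) : Option (Int × Int × Int) :=
  rem.foldl (fun best v => (List.range chemin.length).foldl (pvStepB m chemin v) best) none

def pvBoucleB (m : List (List Int)) : Nat → List Int → List Int → List Int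
  | 0, chemin, _ => chemin
  | fuel + 1, chemin, rem =>
    if rem = [] then chemin
    else
      match pvEtapeB m chemin rem with
      | some (_, pos, v) =>
          pvBoucleB m fuel (PySem.List.insert chemin pos v) ((PySem.List.remove? rem v).getD rem)
      | none => chemin  -- unreachable when chemin ≠ [] and rem ≠ []

def insertion_heuristique_alt (matrice_villes : List (List Int)) : List Int :=
  match PySem.List.pyRange 0 matrice_villes.length 1 with
  | [] => []       -- n = 0: pop(0) raises IndexError (excluded by Pre_)
  | [_] => []      -- n = 1: second pop(0) raises IndexError (excluded by Pre_)
  | v0 :: v1 :: rest => pvBoucleB matrice_villes rest.length [v0, v1] rest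

-- ===== PRECONDITION & SPEC =====
-- A raises IndexError when there are fewer than 2 cities (the two initial pop(0)) or when, with
-- at least 3 cities (so that the matrix is actually read), some row is shorter than the number of
-- cities (matrix access out of range); Pre_ excludes those.
def Pre_insertion_heuristique (matrice_villes : List (List Int)) : Prop :=
  2 ≤ matrice_villes.length ∧
    (3 ≤ matrice_villes.length →
      ∀ row ∈ matrice_villes, matrice_villes.length ≤ row.length)
instance (matrice_villes : List (List Int)) : Decidable (Pre_insertion_heuristique matrice_villes) := by
  unfold Pre_insertion_heuristique; infer_instance

def pvWitness_insertion_heuristique : List (List Int) := [[0, 3, 5], [3, 0, 4], [5, 4, 0]]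

def Spec_insertion_heuristique (matrice_villes : List (List Int)) (out : List Int) : Prop :=
  out = insertion_heuristique_alt matrice_villes
instance (matrice_villes : List (List Int)) (out : List Int) : Decidable (Spec_insertion_heuristique matrice_villes out) := by
  unfold Spec_insertion_heuristique; infer_instance

-- ===== CLAIM (what is proved, stated in full; the proofs are below) =====
def Claim_equal_insertion_heuristique : Prop := ∀ (matrice_villes : List (List Int)), Dom_insertion_heuristique matrice_villes → Pre_insertion_heuristique matrice_villes → Spec_insertion_heuristique matrice_villes (insertion_heuristique matrice_villes)

-- ===== LEMMAS AND PROOFS =====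

-- total cost of an open path (sum over consecutive pairs)
def pvPath (m : List (List Int)) : List Int → Int
  | x :: y :: r => pvAt2 m x y + pvPath m (y :: r)
  | _ => 0

theorem pvGetI_eq_getD (l : List Int) (i : Nat) : pvGetI l i = l.getD i 0 := by
  simp [pvGetI, List.getD]

theorem pvPath_eq_zip (m : List (List Int)) : ∀ s : List Int,
    pvPath m s = ((s.zip s.tail).map (fun p => pvAt2 m p.1 p.2)).sum := by
  intro s
  induction s with
  | nil => rfl
  | cons x t ih =>
    cases t with
    | nil => rfl
    | cons y r => simp [pvPath, ih]

-- the cost of the closed tour is the path cost of the list closed with its head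
theorem pvCoutA_eq_path (m : List (List Int)) (l : List Int) (hl : l ≠ []) :
    pvCoutA m l = pvPath m (l ++ [l.headD 0]) := by
  have hn : 0 < l.length := List.length_pos_iff.mpr hl
  rw [pvCoutA, PySem.List.foldl_add, pvPath_eq_zip, zero_add]
  congr 1
  apply List.ext_getElem
  · simp
  · intro i h1 h2
    simp only [List.getElem_map, List.getElem_range, List.getElem_zip, List.getElem_tail]
    have hi : i < l.length := by simpa using h1
    have e1 : pvGetI l i = l[i] := by
      rw [pvGetI_eq_getD, List.getD_eq_getElem?_getD, List.getElem?_eq_getElem hi]; rfl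
    have e2 : (l ++ [l.headD 0])[i]'(by simp; omega) = l[i] := List.getElem_append_left hi
    have e3 : pvGetI l ((i + 1) % l.length) = (l ++ [l.headD 0])[i+1]'(by simp; omega) := by
      rcases Nat.lt_or_ge (i + 1) l.length with h | h
      · rw [Nat.mod_eq_of_lt h, pvGetI_eq_getD, List.getD_eq_getElem?_getD,
            List.getElem?_eq_getElem h, List.getElem_append_left h]
        rfl
      · have hie : i + 1 = l.length := by omega
        simp only [hie, Nat.mod_self]
        rw [List.getElem_append_right (le_refl _)]
        simp only [Nat.sub_self, List.getElem_cons_zero]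
        cases l with
        | nil => simp at hn
        | cons a t => simp [pvGetI, PySem.List.pyGet?, PySem.List.pyIdx?]
    rw [e1, e2, e3]

theorem pvPath_cons (m : List (List Int)) (x : Int) (s : List Int) (hs : s ≠ []) :
    pvPath m (x :: s) = pvAt2 m x (s.headD 0) + pvPath m s := by
  cases s with
  | nil => exact absurd rfl hs
  | cons y r => rfl

theorem headD_append_cons {P X Y : List Int} (a : Int) :
    (P ++ a :: X).headD 0 = (P ++ a :: Y).headD 0 := by
  cases P <;> simp

-- inserting v between a and b changes the path cost by exactly B's delta
theorem pvPath_insert (m : List (List Int)) :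
    ∀ (P : List Int) (a v b : Int) (r : List Int),
      pvPath m (P ++ a :: v :: b :: r) =
        pvPath m (P ++ a :: b :: r) + (pvAt2 m a v + pvAt2 m v b - pvAt2 m a b) := by
  intro P
  induction P with
  | nil =>
    intro a v b r
    simp only [List.nil_append, pvPath]
    ring
  | cons x P ih =>
    intro a v b r
    rw [List.cons_append, List.cons_append,
        pvPath_cons m x (P ++ a :: v :: b :: r) (by simp),
        pvPath_cons m x (P ++ a :: b :: r) (by simp),
        headD_append_cons (X := v :: b :: r) (Y := b :: r) a, ih]
    ring

theorem getI_succ_mod (l : List Int) (i : Nat) (hi : i < l.length) :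
    pvGetI l ((i + 1) % l.length) = (l.drop (i + 1) ++ [l.headD 0]).headD 0 := by
  rcases Nat.lt_or_ge (i + 1) l.length with h | h
  · rw [Nat.mod_eq_of_lt h, pvGetI_eq_getD, List.drop_eq_getElem_cons h]
    simp [List.getD_eq_getElem?_getD, List.getElem?_eq_getElem h]
  · have hie : i + 1 = l.length := by omega
    rw [hie, Nat.mod_self, List.drop_length]
    cases l with
    | nil => simp at hi
    | cons a t => simp [pvGetI, PySem.List.pyGet?, PySem.List.pyIdx?]

-- the full cost of A's hypothetical tour = current cost + B's delta
theorem cout_test_eq (m : List (List Int)) (l : List Int) (hl : l ≠ []) (i : Nat)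
    (hi : i < l.length) (v : Int) :
    pvCoutA m (l.take (i + 1) ++ [v] ++ l.drop (i + 1)) = pvCoutA m l + pvDelta m l i v := by
  have hdecomp : l = l.take i ++ l[i] :: l.drop (i + 1) := by
    conv_lhs => rw [← List.take_append_drop i l]
    rw [List.drop_eq_getElem_cons hi]
  have htake : l.take (i + 1) = l.take i ++ [l[i]] := by
    rw [List.take_add_one, List.getElem?_eq_getElem hi]
    rfl
  have hheads : (l.take (i + 1) ++ [v] ++ l.drop (i + 1)).headD 0 = l.headD 0 := by
    rw [htake]
    conv_rhs => rw [hdecomp]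
    rw [List.append_assoc, List.append_assoc, List.singleton_append, List.singleton_append]
    exact headD_append_cons l[i]
  rw [pvCoutA_eq_path m _ (by simp), pvCoutA_eq_path m l hl, hheads]
  obtain ⟨b, r, hS⟩ : ∃ b r, l.drop (i + 1) ++ [l.headD 0] = b :: r := by
    cases h' : l.drop (i + 1) with
    | nil => exact ⟨_, _, rfl⟩
    | cons x xs => exact ⟨_, _, rfl⟩
  have hb : b = (l.drop (i + 1) ++ [l.headD 0]).headD 0 := by rw [hS]; rfl
  have e1 : l.take (i + 1) ++ [v] ++ l.drop (i + 1) ++ [l.headD 0] =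
      l.take i ++ l[i] :: v :: b :: r := by
    rw [htake, ← hS]
    simp only [List.append_assoc, List.cons_append, List.nil_append]
  have e2 : l ++ [l.headD 0] = l.take i ++ l[i] :: b :: r := by
    rw [← hS]
    nth_rewrite 1 [hdecomp]
    simp only [List.append_assoc, List.cons_append]
  rw [e1, e2, pvPath_insert]
  have ha : pvGetI l i = l[i] := by
    rw [pvGetI_eq_getD, List.getD_eq_getElem?_getD, List.getElem?_eq_getElem hi]; rfl
  simp only [pvDelta, getI_succ_mod l i hi, ← hb, ha]

-- relation between A's and B's search states: stored costs differ by the current tour length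
def pvRst (base : Int) (sA : Option Int × Option Int × Option Int)
    (sB : Option (Int × Int × Int)) : Prop :=
  (sA = (none, none, none) ∧ sB = none) ∨
  ∃ c p v, sA = (some c, some p, some v) ∧ sB = some (c - base, p, v)

theorem pv_foldl_rel {α β γ : Type} (R : α → β → Prop) (f : α → γ → α) (g : β → γ → β) :
    ∀ (l : List γ), (∀ x ∈ l, ∀ a b, R a b → R (f a x) (g b x)) →
      ∀ a b, R a b → R (l.foldl f a) (l.foldl g b) := by
  intro l
  induction l with
  | nil => intro _ a b hab; simpa using hab
  | cons x t ih =>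
    intro h a b hab
    simp only [List.foldl_cons]
    exact ih (fun y hy a b hab => h y (List.mem_cons_of_mem _ hy) a b hab) _ _
      (h x List.mem_cons_self a b hab)

theorem pvStep_rel (m : List (List Int)) (chemin : List Int) (hc : chemin ≠ []) (v : Int)
    (i : Nat) (hi : i < chemin.length) (sA : Option Int × Option Int × Option Int)
    (sB : Option (Int × Int × Int)) (h : pvRst (pvCoutA m chemin) sA sB) :
    pvRst (pvCoutA m chemin) (pvStepA m chemin v sA i) (pvStepB m chemin v sB i) := by
  have hcast : ((i : Int) + 1) = ((i + 1 : Nat) : Int) := by push_cast; ring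
  have htest : PySem.List.slice chemin none (some ((i : Int) + 1)) ++ [v] ++
      PySem.List.slice chemin (some ((i : Int) + 1)) none =
      chemin.take (i + 1) ++ [v] ++ chemin.drop (i + 1) := by
    rw [hcast, PySem.List.slice_to_natCast, PySem.List.slice_from_natCast]
  have hnc : pvCoutA m (chemin.take (i + 1) ++ [v] ++ chemin.drop (i + 1)) =
      pvCoutA m chemin + pvDelta m chemin i v := cout_test_eq m chemin hc i hi v
  rcases h with ⟨hA, hB⟩ | ⟨c, p, w, hA, hB⟩
  · subst hA; subst hB
    refine Or.inr ⟨_, _, _, rfl, ?_⟩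
    simp only [pvStepB, htest, hnc]
    congr 2
    ring
  · subst hA; subst hB
    simp only [pvStepA, pvStepB, htest, hnc]
    by_cases hlt : pvCoutA m chemin + pvDelta m chemin i v < c
    · rw [if_pos hlt, if_pos (by omega)]
      refine Or.inr ⟨_, _, _, rfl, ?_⟩
      congr 2
      ring
    · rw [if_neg hlt, if_neg (by omega)]
      exact Or.inr ⟨c, p, w, rfl, rfl⟩

theorem pvEtape_rel (m : List (List Int)) (chemin nv : List Int) (hc : chemin ≠ []) :
    pvRst (pvCoutA m chemin) (pvEtapeA m chemin nv) (pvEtapeB m chemin nv) := by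
  unfold pvEtapeA pvEtapeB
  refine pv_foldl_rel _ _ _ nv ?_ _ _ (Or.inl ⟨rfl, rfl⟩)
  intro v _ a b hab
  refine pv_foldl_rel _ _ _ (List.range chemin.length) ?_ _ _ hab
  intro i hi a b hab
  exact pvStep_rel m chemin hc v i (List.mem_range.mp hi) a b hab

theorem pvStepB_some (m : List (List Int)) (chemin : List Int) (v : Int)
    (best : Option (Int × Int × Int)) (i : Nat) : (pvStepB m chemin v best i).isSome := by
  cases best with
  | none => rfl
  | some t =>
    simp only [pvStepB]
    split_ifs <;> rfl

theorem pv_foldl_stepB_some (m : List (List Int)) (chemin : List Int) (v : Int) :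
    ∀ (l : List Nat) (best : Option (Int × Int × Int)),
      (best.isSome ∨ l ≠ []) → ((l.foldl (pvStepB m chemin v) best).isSome) := by
  intro l
  induction l with
  | nil =>
    intro best h
    rcases h with h | h
    · simpa using h
    · exact absurd rfl h
  | cons i t ih =>
    intro best _
    simp only [List.foldl_cons]
    exact ih _ (Or.inl (pvStepB_some m chemin v best i))

theorem pv_foldl_outer_some (m : List (List Int)) (chemin : List Int) :
    ∀ (t : List Int) (best : Option (Int × Int × Int)), best.isSome →
      ((t.foldl (fun best v => (List.range chemin.length).foldl (pvStepB m chemin v) best)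
        best).isSome) := by
  intro t
  induction t with
  | nil => intro best h; simpa using h
  | cons w t ih =>
    intro best h
    simp only [List.foldl_cons]
    exact ih _ (pv_foldl_stepB_some m chemin w _ _ (Or.inl h))

theorem pvEtapeB_some (m : List (List Int)) (chemin nv : List Int) (hc : chemin ≠ [])
    (hnv : nv ≠ []) : (pvEtapeB m chemin nv).isSome := by
  unfold pvEtapeB
  cases nv with
  | nil => exact absurd rfl hnv
  | cons v t =>
    simp only [List.foldl_cons]
    refine pv_foldl_outer_some m chemin t _
      (pv_foldl_stepB_some m chemin v _ _ (Or.inr ?_))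
    intro h
    rw [List.range_eq_nil, List.length_eq_zero_iff] at h
    exact hc h

theorem pv_insert_ne_nil (chemin : List Int) (p v : Int) :
    PySem.List.insert chemin p v ≠ [] := by
  intro h
  have := PySem.List.length_insert chemin p v
  rw [h] at this
  simp at this

theorem boucle_eq (m : List (List Int)) :
    ∀ (fuel : Nat) (chemin nv : List Int), chemin ≠ [] →
      pvBoucleA m fuel chemin nv = pvBoucleB m fuel chemin nv := by
  intro fuel
  induction fuel with
  | zero => intro chemin nv _; rfl
  | succ fuel ih =>
    intro chemin nv hc
    unfold pvBoucleA pvBoucleB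
    by_cases hnv : nv = []
    · simp [hnv]
    · simp only [if_neg hnv]
      have hrel := pvEtape_rel m chemin nv hc
      have hsome := pvEtapeB_some m chemin nv hc hnv
      rcases hrel with ⟨hA, hB⟩ | ⟨c, p, w, hA, hB⟩
      · rw [hB] at hsome; simp at hsome
      · rw [hA, hB]
        exact ih _ _ (pv_insert_ne_nil chemin p w)

-- ===== VERDICT (by name: the statement is the Claim_ definition above) =====
theorem insertion_heuristique_spec : Claim_equal_insertion_heuristique := by
  intro m _ hpre
  obtain ⟨h2, _⟩ := hpre
  have h2' : (2 : Int) ≤ (m.length : Int) := by exact_mod_cast h2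
  have e : PySem.List.pyRange 0 (m.length : Int) 1 =
      0 :: 1 :: PySem.List.pyRange 2 (m.length : Int) 1 := by
    rw [PySem.List.pyRange_one_cons (by omega), PySem.List.pyRange_one_cons (by omega)]
    norm_num
  unfold Spec_insertion_heuristique insertion_heuristique insertion_heuristique_alt
  rw [e]
  exact boucle_eq m _ [0, 1] _ (by simp)
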